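-- pv_equiv track=rewrite | github.com/jcolinpatrick/kryptos | scripts/_uncategorized/e_s_92_community_proposals.py | build_grid_65
-- ===== SOURCE A (Python) =====
-- AZ = "ABCDEFGHIJKLMNOPQRSTUVWXYZ"
--
-- def build_grid_65(keyword):
--     seen = set()
--     grid = []
--     for c in keyword.upper():
--         if c not in seen and c in AZ:
--             seen.add(c)
--             grid.append(c)
--     for c in AZ:
--         if c not in seen:
--             seen.add(c)
--             grid.append(c)
--     return grid[:26]  # 26 letters in order
-- ===== SOURCE B (Python) =====
-- AZ = "ABCDEFGHIJKLMNOPQRSTUVWXYZ"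
--
-- def build_grid_65(keyword):
--     kw = keyword.upper()
--     # rank each alphabet letter: its first-occurrence position in the keyword if
--     # present, otherwise after all keyword letters, in alphabetical order
--     return sorted(AZ, key=lambda c: kw.find(c) if c in kw else len(kw) + AZ.find(c))
-- ===== Notes on version B (the rewrite author's own statement) =====
-- stated objective: alternative
-- what changed: Instead of A's two dedup loops over keyword-then-alphabet with a mutable seen set, B sorts the 26 alphabet letters by a computed rank: first-occurrence position in the uppercased keyword if present, otherwise len(keyword) plus the letter's alphabet position.
import Mathlib
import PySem

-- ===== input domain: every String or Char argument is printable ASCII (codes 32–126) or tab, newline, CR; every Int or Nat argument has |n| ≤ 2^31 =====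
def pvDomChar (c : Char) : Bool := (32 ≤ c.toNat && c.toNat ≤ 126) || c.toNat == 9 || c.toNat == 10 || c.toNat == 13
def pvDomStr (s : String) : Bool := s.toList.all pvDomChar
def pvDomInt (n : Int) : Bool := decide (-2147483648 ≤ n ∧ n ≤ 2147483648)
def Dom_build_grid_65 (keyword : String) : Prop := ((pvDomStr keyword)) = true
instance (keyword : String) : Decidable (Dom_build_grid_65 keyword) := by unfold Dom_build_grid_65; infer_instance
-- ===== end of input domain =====

-- B replaces A's two dedup-with-a-seen-set loops by a different algorithm: it SORTS the 26
-- alphabet letters by a computed rank (first-occurrence position in the keyword if present,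
-- otherwise after all keyword letters in alphabetical order); objective: alternative.

-- module constant AZ; pvAZ is it as the list of its one-character strings (Python iterates
-- a str by single-character strings; 'c in AZ' for such c is membership in this list)
def pvAZs : String := "ABCDEFGHIJKLMNOPQRSTUVWXYZ"
def pvAZ : List String := pvAZs.toList.map Char.toString

-- ===== PORT A =====
-- first loop: for c in keyword.upper(): if c not in seen and c in AZ: …
def pvLoop1 (cs : List String) (seen : PySem.Set String) (grid : List String) :
    PySem.Set String × List String :=
  match cs with
  | [] => (seen, grid)
  | c :: rest =>
    if ¬ (PySem.Set.contains seen c = true) ∧ c ∈ pvAZ then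
      pvLoop1 rest (PySem.Set.add seen c) (grid ++ [c])
    else
      pvLoop1 rest seen grid

-- second loop: for c in AZ: if c not in seen: …
def pvLoop2 (cs : List String) (seen : PySem.Set String) (grid : List String) :
    PySem.Set String × List String :=
  match cs with
  | [] => (seen, grid)
  | c :: rest =>
    if ¬ (PySem.Set.contains seen c = true) then
      pvLoop2 rest (PySem.Set.add seen c) (grid ++ [c])
    else
      pvLoop2 rest seen grid

def build_grid_65 (keyword : String) : List String :=
  let p1 := pvLoop1 ((PySem.Str.upper keyword).toList.map Char.toString) PySem.Set.empty []
  let p2 := pvLoop2 pvAZ p1.1 p1.2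
  PySem.List.slice p2.2 none (some 26)   -- grid[:26]

-- ===== PORT B =====
-- sorted(AZ, key=lambda c: kw.find(c) if c in kw else len(kw) + AZ.find(c))
def build_grid_65_alt (keyword : String) : List String :=
  let kw := PySem.Str.upper keyword
  PySem.List.sorted pvAZ
    (fun c => if PySem.Str.isIn c kw then PySem.Str.find kw c
              else PySem.Str.len kw + PySem.Str.find pvAZs c)

-- ===== PRECONDITION & SPEC =====
def Spec_build_grid_65 (keyword : String) (out : List String) : Prop := out = build_grid_65_alt keyword
instance (keyword : String) (out : List String) : Decidable (Spec_build_grid_65 keyword out) := by unfold Spec_build_grid_65; infer_instance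

-- ===== CLAIM (what is proved, stated in full; the proofs are below) =====
def Claim_equal_build_grid_65 : Prop := ∀ (keyword : String), Dom_build_grid_65 keyword → Spec_build_grid_65 keyword (build_grid_65 keyword)

-- ===== LEMMAS AND PROOFS =====

-- first-occurrence index used to reason about first-occurrence dedup order
def pvIdx : List String → String → Nat
  | [], _ => 0
  | x :: t, a => if a = x then 0 else pvIdx t a + 1

-- first-occurrence dedup in recursive form
def pvDedup : List String → List String
  | [] => []
  | x :: t => x :: (pvDedup t).filter (fun y => decide (y ≠ x))

lemma pvContains_iff (s : PySem.Set String) (c : String) :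
    PySem.Set.contains s c = true ↔ c ∈ s := by
  simp [PySem.Set.contains]

lemma pvLoop1_eq (cs : List String) (s : PySem.Set String) :
    pvLoop1 cs s s =
      ((cs.filter (fun c => decide (c ∈ pvAZ))).foldl PySem.Set.add s,
       (cs.filter (fun c => decide (c ∈ pvAZ))).foldl PySem.Set.add s) := by
  induction cs generalizing s with
  | nil => simp [pvLoop1]
  | cons c rest ih =>
    by_cases haz : c ∈ pvAZ
    · by_cases hc : PySem.Set.contains s c = true
      · simp [pvLoop1, haz, ih, (pvContains_iff s c).mp hc]
      · have hm : c ∉ s := fun h => hc ((pvContains_iff s c).mpr h)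
        simp [pvLoop1, haz, ih, hm]
    · simp [pvLoop1, haz, ih]

lemma pvLoop2_eq (cs : List String) (s : PySem.Set String) :
    pvLoop2 cs s s = (cs.foldl PySem.Set.add s, cs.foldl PySem.Set.add s) := by
  induction cs generalizing s with
  | nil => simp [pvLoop2]
  | cons c rest ih =>
    by_cases hc : PySem.Set.contains s c = true
    · simp [pvLoop2, ih, (pvContains_iff s c).mp hc]
    · have hm : c ∉ s := fun h => hc ((pvContains_iff s c).mpr h)
      simp [pvLoop2, ih, hm]

-- cons computation rules for pvIdx
lemma pvIdx_cons_eq (x : String) (t : List String) : pvIdx (x :: t) x = 0 := by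
  simp [pvIdx]

lemma pvIdx_cons_ne (x a : String) (t : List String) (h : a ≠ x) :
    pvIdx (x :: t) a = pvIdx t a + 1 := by
  simp [pvIdx, h]

lemma pvFilter_in (s : PySem.Set String) (x : String) (l : List String) (hx : x ∈ s) :
    (x :: l.filter (fun y => decide (y ≠ x))).filter (fun y => decide (y ∉ s))
      = l.filter (fun y => decide (y ∉ s)) := by
  rw [List.filter_cons]
  have h0 : (decide (x ∉ s)) = false := by simp [hx]
  rw [h0]
  simp only [Bool.false_eq_true, if_false, List.filter_filter]
  apply List.filter_congr
  intro a _
  by_cases hax : a = x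
  · subst hax; simp [hx]
  · simp [hax]

lemma pvFilter_out (s : PySem.Set String) (x : String) (l : List String) (hx : x ∉ s) :
    (x :: l.filter (fun y => decide (y ≠ x))).filter (fun y => decide (y ∉ s))
      = x :: l.filter (fun y => decide (y ∉ s ++ [x])) := by
  rw [List.filter_cons]
  have h0 : (decide (x ∉ s)) = true := by simp [hx]
  rw [h0]
  simp only [if_true, List.filter_filter]
  congr 1
  apply List.filter_congr
  intro a _
  by_cases hax : a = x
  · subst hax; simp
  · simp [hax]

-- a run of Set.add's appends exactly the (first-occurrence-deduped) new elements
lemma pvFoldl_add (xs : List String) (s : PySem.Set String) :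
    xs.foldl PySem.Set.add s = s ++ (pvDedup xs).filter (fun y => decide (y ∉ s)) := by
  induction xs generalizing s with
  | nil => simp [pvDedup]
  | cons x t ih =>
    have hadd : PySem.Set.add s x = (if x ∈ s then s else s ++ [x]) := by
      by_cases hx : x ∈ s
      · simp [PySem.Set.add, hx]
      · simp [PySem.Set.add, hx]
    by_cases hx : x ∈ s
    · rw [List.foldl_cons, hadd, if_pos hx, ih,
        show pvDedup (x :: t) = x :: (pvDedup t).filter (fun y => decide (y ≠ x)) from rfl,
        pvFilter_in s x (pvDedup t) hx]
    · rw [List.foldl_cons, hadd, if_neg hx, ih,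
        show pvDedup (x :: t) = x :: (pvDedup t).filter (fun y => decide (y ≠ x)) from rfl,
        pvFilter_out s x (pvDedup t) hx]
      simp

lemma pvOfList_eq (xs : List String) : PySem.Set.ofList xs = pvDedup xs := by
  rw [PySem.Set.ofList_eq_foldl, pvFoldl_add]
  simp

lemma pvMem_dedup (xs : List String) (y : String) : y ∈ pvDedup xs ↔ y ∈ xs := by
  rw [← pvOfList_eq]; exact PySem.Set.mem_ofList xs y

lemma pvNodup_dedup (xs : List String) : (pvDedup xs).Nodup := by
  rw [← pvOfList_eq]; exact PySem.Set.nodup_ofList xs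

lemma pvIdx_lt_length (xs : List String) (a : String) (h : a ∈ xs) :
    pvIdx xs a < xs.length := by
  induction xs with
  | nil => cases h
  | cons x t ih =>
    by_cases hax : a = x
    · simp [pvIdx, hax]
    · have hat : a ∈ t := by
        rcases List.mem_cons.mp h with h' | h'
        · exact absurd h' hax
        · exact h'
      have := ih hat
      rw [pvIdx_cons_ne x a t hax]
      simp only [List.length_cons]
      omega

-- filtering preserves the relative order of first-occurrence indices
lemma pvIdx_filter_mono (xs : List String) (p : String → Bool) (a b : String)
    (ha : a ∈ xs.filter p) (hb : b ∈ xs.filter p)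
    (h : pvIdx (xs.filter p) a < pvIdx (xs.filter p) b) :
    pvIdx xs a < pvIdx xs b := by
  induction xs with
  | nil => simp at ha
  | cons x t ih =>
    by_cases hpx : p x = true
    · simp only [List.filter_cons, hpx, if_pos] at ha hb h
      by_cases hax : a = x
      · subst hax
        rw [pvIdx_cons_eq]
        by_cases hbx : b = a
        · subst hbx; rw [pvIdx_cons_eq] at h; omega
        · rw [pvIdx_cons_ne a b t hbx]; omega
      · by_cases hbx : b = x
        · subst hbx
          rw [pvIdx_cons_eq b (t.filter p), pvIdx_cons_ne b a (t.filter p) hax] at h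
          omega
        · rw [pvIdx_cons_ne x a (t.filter p) hax, pvIdx_cons_ne x b (t.filter p) hbx] at h
          rw [pvIdx_cons_ne x a t hax, pvIdx_cons_ne x b t hbx]
          have ha' : a ∈ t.filter p := by
            rcases List.mem_cons.mp ha with h' | h'
            · exact absurd h' hax
            · exact h'
          have hb' : b ∈ t.filter p := by
            rcases List.mem_cons.mp hb with h' | h'
            · exact absurd h' hbx
            · exact h'
          have := ih ha' hb' (by omega)
          omega
    · have hfe : (x :: t).filter p = t.filter p := by
        simp [hpx]
      rw [hfe] at ha hb h
      have hap : p a = true := (List.mem_filter.mp ha).2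
      have hbp : p b = true := (List.mem_filter.mp hb).2
      have hax : a ≠ x := fun e => hpx (e ▸ hap)
      have hbx : b ≠ x := fun e => hpx (e ▸ hbp)
      have := ih ha hb h
      rw [pvIdx_cons_ne x a t hax, pvIdx_cons_ne x b t hbx]
      omega

-- the dedup is ordered by first-occurrence index in the source list
lemma pvDedup_pairwise (xs : List String) :
    (pvDedup xs).Pairwise (fun a b => pvIdx xs a < pvIdx xs b) := by
  induction xs with
  | nil => simp [pvDedup]
  | cons x t ih =>
    simp only [pvDedup, List.pairwise_cons]
    constructor
    · intro b hb
      have hbne : b ≠ x := by simpa using (List.mem_filter.mp hb).2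
      rw [pvIdx_cons_eq, pvIdx_cons_ne x b t hbne]
      omega
    · have hsub : ((pvDedup t).filter (fun y => decide (y ≠ x))).Sublist (pvDedup t) :=
        List.filter_sublist
      refine (List.Pairwise.sublist hsub ih).imp_of_mem ?_
      intro a b ha hb hlt
      have hane : a ≠ x := by simpa using (List.mem_filter.mp ha).2
      have hbne : b ≠ x := by simpa using (List.mem_filter.mp hb).2
      rw [pvIdx_cons_ne x a t hane, pvIdx_cons_ne x b t hbne]
      omega

lemma pvToString_inj (c d : Char) (h : Char.toString c = Char.toString d) : c = d := by
  simpa [Char.toString] using congrArg String.toList h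

-- single-character find: what str.find computes is the first-occurrence index
lemma pvFindGo_mem (ch : Char) (u : List Char) (k : Nat) (h : ch ∈ u) :
    PySem.Chars.find.go [ch] u k = ((k + pvIdx (u.map Char.toString) (Char.toString ch) : Nat) : Int) := by
  induction u generalizing k with
  | nil => cases h
  | cons x t ih =>
    by_cases hcx : ch = x
    · subst hcx
      simp [PySem.Chars.find.go, List.isPrefixOf, pvIdx]
    · have hne : Char.toString ch ≠ Char.toString x := fun e => hcx (pvToString_inj _ _ e)
      have hmem : ch ∈ t := by
        rcases List.mem_cons.mp h with h' | h'
        · exact absurd h' hcx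
        · exact h'
      rw [List.map_cons, pvIdx_cons_ne (Char.toString x) (Char.toString ch) _ hne]
      have hgo : PySem.Chars.find.go [ch] (x :: t) k = PySem.Chars.find.go [ch] t (k + 1) := by
        simp [PySem.Chars.find.go, List.isPrefixOf, hcx]
      rw [hgo, ih (k + 1) hmem]
      push_cast
      ring

lemma pvFindGo_not (ch : Char) (u : List Char) (k : Nat) (h : ch ∉ u) :
    PySem.Chars.find.go [ch] u k = -1 := by
  induction u generalizing k with
  | nil => simp [PySem.Chars.find.go, List.isEmpty]
  | cons x t ih =>
    have hcx : ch ≠ x := fun e => h (e ▸ List.mem_cons_self)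
    have hmem : ch ∉ t := fun h' => h (List.mem_cons_of_mem _ h')
    simp [PySem.Chars.find.go, List.isPrefixOf, hcx, ih (k + 1) hmem]

lemma pvStrFind_mem (s : String) (ch : Char) (h : ch ∈ s.toList) :
    PySem.Str.find s (Char.toString ch) = (pvIdx (s.toList.map Char.toString) (Char.toString ch) : Int) := by
  simp [PySem.Str.find, PySem.Chars.find, pvFindGo_mem ch s.toList 0 h]

lemma pvStrIsIn_true (s : String) (ch : Char) (h : ch ∈ s.toList) :
    PySem.Str.isIn (Char.toString ch) s = true := by
  have h2 := pvFindGo_mem ch s.toList 0 h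
  simp [PySem.Str.isIn, PySem.Chars.isIn, PySem.Chars.find, h2]

lemma pvStrIsIn_false (s : String) (ch : Char) (h : ch ∉ s.toList) :
    PySem.Str.isIn (Char.toString ch) s = false := by
  simp [PySem.Str.isIn, PySem.Chars.isIn, PySem.Chars.find, pvFindGo_not ch s.toList 0 h]

-- facts about the fixed alphabet, by computation
lemma pvAZ_nodup : pvAZ.Nodup := by decide
lemma pvDedup_AZ : pvDedup pvAZ = pvAZ := by decide
lemma pvAZ_find_nonneg : ∀ b ∈ pvAZ, 0 ≤ PySem.Str.find pvAZs b := by decide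
lemma pvAZ_find_pairwise :
    pvAZ.Pairwise (fun a b => PySem.Str.find pvAZs a < PySem.Str.find pvAZs b) := by decide

-- ===== VERDICT (by name: the statement is the Claim_ definition above) =====
theorem build_grid_65_spec : Claim_equal_build_grid_65 := by
  intro keyword _
  unfold Spec_build_grid_65 build_grid_65 build_grid_65_alt
  set kw := PySem.Str.upper keyword with hkw
  set u : List Char := kw.toList with hu
  set kwS : List String := u.map Char.toString with hkwS
  set kwL : List String := kwS.filter (fun c => decide (c ∈ pvAZ)) with hkwL
  set D : List String := pvDedup kwL with hD
  set grid : List String := D ++ pvAZ.filter (fun y => decide (y ∉ D)) with hgrid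
  -- key of B, with its two evaluation facts
  set key : String → Int :=
    (fun c => if PySem.Str.isIn c kw then PySem.Str.find kw c
              else PySem.Str.len kw + PySem.Str.find pvAZs c) with hkey
  have hmemD : ∀ a ∈ D, a ∈ kwL := fun a ha => (pvMem_dedup kwL a).mp ha
  have hchar : ∀ a ∈ kwL, ∃ ch, ch ∈ u ∧ a = Char.toString ch := by
    intro a ha
    have : a ∈ kwS := (List.mem_filter.mp ha).1
    rcases List.mem_map.mp this with ⟨ch, hch, he⟩
    exact ⟨ch, hch, he.symm⟩
  have hkeyD : ∀ a ∈ D, key a = (pvIdx kwS a : Int) := by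
    intro a ha
    rcases hchar a (hmemD a ha) with ⟨ch, hchu, rfl⟩
    have h1 := pvStrIsIn_true kw ch hchu
    have h2 := pvStrFind_mem kw ch hchu
    rw [hkey]
    simp only [h1, if_true, h2]
    rfl
  have hkeyF : ∀ b ∈ pvAZ.filter (fun y => decide (y ∉ D)), key b = PySem.Str.len kw + PySem.Str.find pvAZs b := by
    intro b hb
    have hbAZ : b ∈ pvAZ := (List.mem_filter.mp hb).1
    have hbD : b ∉ D := by simpa using (List.mem_filter.mp hb).2
    rcases List.mem_map.mp (show b ∈ pvAZs.toList.map Char.toString from hbAZ) with ⟨ch, _, rfl⟩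
    have hnu : ch ∉ u := by
      intro hchu
      apply hbD
      rw [hD, pvMem_dedup, hkwL, List.mem_filter]
      exact ⟨List.mem_map.mpr ⟨ch, hchu, rfl⟩, by simpa using hbAZ⟩
    have h1 := pvStrIsIn_false kw ch hnu
    rw [hkey]
    simp only [h1, Bool.false_eq_true, if_false]
  -- A computes: grid, sliced to 26
  have hA : (let p1 := pvLoop1 (kw.toList.map Char.toString) PySem.Set.empty []
             let p2 := pvLoop2 pvAZ p1.1 p1.2
             PySem.List.slice p2.2 none (some 26)) = PySem.List.slice grid none (some 26) := by
    have he : (PySem.Set.empty : PySem.Set String) = [] := rfl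
    have h1 : pvLoop1 (kw.toList.map Char.toString) PySem.Set.empty [] = (D, D) := by
      have hft : (fun y : String => decide (y ∉ ([] : List String))) = fun _ => true := by
        funext y; simp
      rw [he, pvLoop1_eq]
      simp only [pvFoldl_add, hft, List.filter_true, List.nil_append]
      rfl
    have h2 : pvLoop2 pvAZ D D = (grid, grid) := by
      rw [pvLoop2_eq, pvFoldl_add, pvDedup_AZ, ← hgrid]
    simp only [h1, h2]
  rw [hA]
  -- grid is a permutation of the alphabet
  have hmemgrid : ∀ x, x ∈ grid ↔ x ∈ pvAZ := by
    intro x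
    rw [hgrid, List.mem_append, List.mem_filter]
    constructor
    · rintro (hx | ⟨hx, _⟩)
      · have := (List.mem_filter.mp (hmemD x hx)).2
        simpa using this
      · exact hx
    · intro hx
      by_cases hxd : x ∈ D
      · exact Or.inl hxd
      · exact Or.inr ⟨hx, by simpa using hxd⟩
  have hnodup : grid.Nodup := by
    rw [hgrid, List.nodup_append]
    refine ⟨pvNodup_dedup kwL, pvAZ_nodup.filter _, ?_⟩
    intro a ha b hb heq
    subst heq
    have := (List.mem_filter.mp hb).2
    simp at this
    exact this ha
  have hperm : grid.Perm pvAZ := by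
    refine List.perm_of_nodup_nodup_toFinset_eq hnodup pvAZ_nodup ?_
    ext x
    simp only [List.mem_toFinset]
    exact hmemgrid x
  -- slicing to 26 is the identity on grid
  have hlen : grid.length = 26 := by
    rw [hperm.length_eq]; decide
  have hslice : PySem.List.slice grid none (some 26) = grid := by
    simp [PySem.List.slice, PySem.List.clampIdx, hlen]
  rw [hslice]
  -- grid is strictly increasing under B's key
  have hpair : grid.Pairwise (fun a b => key a < key b) := by
    rw [hgrid, List.pairwise_append]
    refine ⟨?_, ?_, ?_⟩
    · refine (pvDedup_pairwise kwL).imp_of_mem ?_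
      intro a b ha hb hlt
      have haL := hmemD a ha
      have hbL := hmemD b hb
      have := pvIdx_filter_mono kwS _ a b (hkwL ▸ haL) (hkwL ▸ hbL) (by rw [← hkwL]; exact hlt)
      rw [hkeyD a ha, hkeyD b hb]
      exact_mod_cast this
    · refine (List.Pairwise.sublist List.filter_sublist pvAZ_find_pairwise).imp_of_mem ?_
      intro a b ha hb hlt
      rw [hkeyF a ha, hkeyF b hb]
      omega
    · intro a ha b hb
      rw [hkeyD a ha, hkeyF b hb]
      have h1 : pvIdx kwS a < kwS.length :=
        pvIdx_lt_length kwS a (List.mem_filter.mp (hkwL ▸ hmemD a ha)).1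
      have h2 : 0 ≤ PySem.Str.find pvAZs b := pvAZ_find_nonneg b (List.mem_filter.mp hb).1
      have h3 : PySem.Str.len kw = (kwS.length : Int) := by
        simp [PySem.Str.len, hkwS, hu]
      omega
  exact (PySem.List.sorted_eq_of_perm_of_pairwise_lt pvAZ grid key hperm hpair).symm
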